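-- pv_equiv track=rewrite | github.com/thealper2/codewars-solutions | 6-kyu/find_cracker.py | find_hack
-- ===== SOURCE A (Python) =====
-- def find_hack(arr):
--     hacked = []
--     grade_points = {'A': 30, 'B': 20, 'C': 10, 'D': 5}
--     for record in arr:
--         name, reported_score, grades = record
--         actual_score = 0
--         all_b_or_above = True
--
--         for grade in grades:
--             actual_score += grade_points.get(grade, 0)
--             if grade not in ['A', 'B']:
--                 all_b_or_above = False
--
--         if len(grades) >= 5 and all_b_or_above:
--             actual_score += 20
--
--         actual_score = min(actual_score, 200)
--         if actual_score != reported_score: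
--             hacked.append(name)
--
--     return hacked
-- ===== SOURCE B (Python) =====
-- def _counts(grades):
--     c = {}
--     for g in grades:
--         c[g] = c.get(g, 0) + 1
--     return c
--
--
-- def _actual_score(grades):
--     c = _counts(grades)
--     score = 30 * c.get('A', 0) + 20 * c.get('B', 0) + 10 * c.get('C', 0) + 5 * c.get('D', 0)
--     if len(grades) >= 5 and c.get('A', 0) + c.get('B', 0) == len(grades):
--         score += 20
--     return min(score, 200)
--
--
-- def find_hack(arr):
--     return [name for name, reported_score, grades in arr
--             if _actual_score(grades) != reported_score]
-- ===== Notes on version B (the rewrite author's own statement) =====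
-- stated objective: idiomatic
-- what changed: Instead of A's single stateful scan that accumulates a running score and an all-B-or-above flag with a points-dict lookup per grade, B first builds a frequency table (a hand-rolled Counter) of the grades in one grouping pass and then derives the score arithmetically from the four counts and the bonus condition as cA+cB == len(grades); the outer loop becomes a comprehension over a predicate.
import Mathlib
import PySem

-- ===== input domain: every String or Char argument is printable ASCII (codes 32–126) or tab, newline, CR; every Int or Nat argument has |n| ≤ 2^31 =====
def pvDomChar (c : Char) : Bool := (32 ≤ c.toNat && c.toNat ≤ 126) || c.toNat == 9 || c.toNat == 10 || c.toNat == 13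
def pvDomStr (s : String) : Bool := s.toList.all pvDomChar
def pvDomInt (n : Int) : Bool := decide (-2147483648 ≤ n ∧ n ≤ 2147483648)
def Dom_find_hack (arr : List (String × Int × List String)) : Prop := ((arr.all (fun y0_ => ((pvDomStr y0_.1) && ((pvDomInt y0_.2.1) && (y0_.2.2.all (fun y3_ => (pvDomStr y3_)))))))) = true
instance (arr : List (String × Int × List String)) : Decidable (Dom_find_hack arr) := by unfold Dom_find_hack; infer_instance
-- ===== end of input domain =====

-- B replaces A's single stateful scan (running score + all-B-or-above flag with a per-grade
-- points-dict lookup) by two stages: a frequency table of the grades built in one grouping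
-- pass, then the score derived arithmetically from the four counts (bonus when cA+cB == len);
-- the outer loop becomes a comprehension. Same cost; the aim is a more idiomatic decomposition.

-- ===== PORT A =====
def find_hack (arr : List (String × Int × List String)) : List String :=
  let grade_points : PySem.Dict String Int :=
    ((((PySem.Dict.empty).insert "A" 30).insert "B" 20).insert "C" 10).insert "D" 5
  arr.foldl (fun hacked record =>
    let name := record.1
    let reported_score := record.2.1
    let grades := record.2.2
    let st := grades.foldl (fun (st : Int × Bool) grade =>
      (st.1 + grade_points.getD grade 0,
       if grade ∈ ["A", "B"] then st.2 else false)) (0, true)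
    let actual_score := if (grades.length : Int) ≥ 5 ∧ st.2 = true then st.1 + 20 else st.1
    let actual_score := min actual_score 200
    if actual_score ≠ reported_score then hacked ++ [name] else hacked) []

-- ===== PORT B =====
-- B's _counts: c = {}; for g in grades: c[g] = c.get(g, 0) + 1
def countsB (grades : List String) : PySem.Dict String Int :=
  grades.foldl (fun c g => c.insert g (c.getD g 0 + 1)) PySem.Dict.empty

def actualScoreB (grades : List String) : Int :=
  let c := countsB grades
  let score : Int := 30 * c.getD "A" 0 + 20 * c.getD "B" 0
      + 10 * c.getD "C" 0 + 5 * c.getD "D" 0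
  let score := if grades.length ≥ 5 ∧ c.getD "A" 0 + c.getD "B" 0 = (grades.length : Int)
    then score + 20 else score
  min score 200

def find_hack_alt (arr : List (String × Int × List String)) : List String :=
  arr.filterMap (fun r =>
    if actualScoreB r.2.2 ≠ r.2.1 then some r.1 else none)

-- ===== PRECONDITION & SPEC =====
def Spec_find_hack (arr : List (String × Int × List String)) (out : List String) : Prop := out = find_hack_alt arr
instance (arr : List (String × Int × List String)) (out : List String) : Decidable (Spec_find_hack arr out) := by unfold Spec_find_hack; infer_instance

-- ===== CLAIM (what is proved, stated in full; the proofs are below) =====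
def Claim_equal_find_hack : Prop := ∀ (arr : List (String × Int × List String)), Dom_find_hack arr → Spec_find_hack arr (find_hack arr)

-- ===== LEMMAS AND PROOFS =====

-- A's inner loop from an arbitrary start state, characterised by counts.
theorem inner_loop_char (grades : List String) (s : Int) (b : Bool) :
    grades.foldl (fun (st : Int × Bool) grade =>
      (st.1 + (((((PySem.Dict.empty).insert "A" (30:Int)).insert "B" 20).insert "C" 10).insert "D" 5).getD grade 0,
       if grade ∈ ["A", "B"] then st.2 else false)) (s, b)
    = (s + 30 * grades.count "A" + 20 * grades.count "B" + 10 * grades.count "C"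
         + 5 * grades.count "D",
       b && grades.all (fun g => g = "A" ∨ g = "B")) := by
  induction grades generalizing s b with
  | nil => simp
  | cons g t ih =>
    simp only [List.foldl_cons, ih, List.count_cons, List.all_cons]
    by_cases h1 : g = "A"
    · subst h1
      have hv : (((((PySem.Dict.empty).insert "A" (30:Int)).insert "B" 20).insert "C" 10).insert "D" 5).getD "A" 0 = 30 := by decide
      simp [hv]; ring
    · by_cases h2 : g = "B"
      · subst h2
        have hv : (((((PySem.Dict.empty).insert "A" (30:Int)).insert "B" 20).insert "C" 10).insert "D" 5).getD "B" 0 = 20 := by decide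
        simp [hv, h1]; ring
      · by_cases h3 : g = "C"
        · subst h3
          have hv : (((((PySem.Dict.empty).insert "A" (30:Int)).insert "B" 20).insert "C" 10).insert "D" 5).getD "C" 0 = 10 := by decide
          simp [hv, h1, h2]; ring
        · by_cases h4 : g = "D"
          · subst h4
            have hv : (((((PySem.Dict.empty).insert "A" (30:Int)).insert "B" 20).insert "C" 10).insert "D" 5).getD "D" 0 = 5 := by decide
            simp [hv, h1, h2]; ring
          · have e1 : ("A" == g) = false := beq_eq_false_iff_ne.mpr (Ne.symm h1)
            have e2 : ("B" == g) = false := beq_eq_false_iff_ne.mpr (Ne.symm h2)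
            have e3 : ("C" == g) = false := beq_eq_false_iff_ne.mpr (Ne.symm h3)
            have e4 : ("D" == g) = false := beq_eq_false_iff_ne.mpr (Ne.symm h4)
            have hv : (((((PySem.Dict.empty).insert "A" (30:Int)).insert "B" 20).insert "C" 10).insert "D" 5).getD g 0 = 0 := by
              simp [PySem.Dict.getD, PySem.Dict.get?, PySem.Dict.empty, PySem.Dict.insert, List.find?, e1, e2, e3, e4]
            simp [hv, h1, h2, h3, h4]

-- B's frequency table looks up to list counts.
theorem countsB_getD (grades : List String) (v : String) :
    (countsB grades).getD v 0 = (grades.count v : Int) := by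
  unfold countsB
  rw [PySem.Dict.getD_foldl_insert_add_one]
  simp [PySem.Dict.getD, PySem.Dict.get?, PySem.Dict.empty]

theorem countAB_le (t : List String) : t.count "A" + t.count "B" ≤ t.length := by
  induction t with
  | nil => simp
  | cons g t ih =>
    by_cases h1 : g = "A" <;> by_cases h2 : g = "B" <;>
      simp_all <;> omega

theorem count_AB_eq_length (grades : List String) :
    (grades.count "A" + grades.count "B" = grades.length)
      ↔ grades.all (fun g => g = "A" ∨ g = "B") = true := by
  induction grades with
  | nil => simp
  | cons g t ih =>
    simp only [List.count_cons, List.length_cons, List.all_cons, Bool.and_eq_true,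
      decide_eq_true_eq]
    by_cases h1 : g = "A"
    · subst h1
      constructor
      · intro h
        refine ⟨by tauto, ih.mp ?_⟩
        simp at h; omega
      · rintro ⟨-, h⟩
        have := ih.mpr h
        simp; omega
    · by_cases h2 : g = "B"
      · subst h2
        constructor
        · intro h
          refine ⟨by tauto, ih.mp ?_⟩
          simp at h; omega
        · rintro ⟨-, h⟩
          have := ih.mpr h
          simp; omega
      · have hle := countAB_le t
        have hg : ¬(g = "A" ∨ g = "B") := by tauto
        simp [h1, h2]
        omega

theorem per_record (grades : List String) :
    (let st := grades.foldl (fun (st : Int × Bool) grade =>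
        (st.1 + (((((PySem.Dict.empty).insert "A" (30:Int)).insert "B" 20).insert "C" 10).insert "D" 5).getD grade 0,
         if grade ∈ ["A", "B"] then st.2 else false)) (0, true)
     let actual := if (grades.length : Int) ≥ 5 ∧ st.2 = true then st.1 + 20 else st.1
     min actual 200) = actualScoreB grades := by
  simp only [inner_loop_char, actualScoreB, countsB_getD]
  have hiff := count_AB_eq_length grades
  by_cases hall : (grades.all fun g => decide (g = "A" ∨ g = "B")) = true
  · have hall' : ∀ x ∈ grades, x = "A" ∨ x = "B" := by simpa using hall
    have heq : grades.count "A" + grades.count "B" = grades.length := hiff.mpr hall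
    have heqZ : (grades.count "A" : Int) + (grades.count "B" : Int) = (grades.length : Int) := by
      exact_mod_cast heq
    by_cases hlen : grades.length ≥ 5
    · have hc : ((grades.length : Int) ≥ 5) := by exact_mod_cast hlen
      simp [hlen, heqZ, hc]
      rw [if_pos hall']
    · have hc : ¬ ((grades.length : Int) ≥ 5) := by exact_mod_cast hlen
      simp [hlen, hc]
  · have hne : ¬ (grades.count "A" + grades.count "B" = grades.length) :=
      fun h => hall (hiff.mp h)
    have hneZ : ¬ ((grades.count "A" : Int) + (grades.count "B" : Int) = (grades.length : Int)) := by
      intro h; exact hne (by exact_mod_cast h)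
    have hall'' : ¬ ∀ x ∈ grades, x = "A" ∨ x = "B" := by
      intro h; exact hall (by simpa using h)
    simp [hneZ, hall'']

theorem foldl_filterMap (arr : List (String × Int × List String)) (acc : List String) :
    arr.foldl (fun hacked record =>
      let grades := record.2.2
      let st := grades.foldl (fun (st : Int × Bool) grade =>
        (st.1 + (((((PySem.Dict.empty).insert "A" (30:Int)).insert "B" 20).insert "C" 10).insert "D" 5).getD grade 0,
         if grade ∈ ["A", "B"] then st.2 else false)) (0, true)
      let actual := if (grades.length : Int) ≥ 5 ∧ st.2 = true then st.1 + 20 else st.1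
      let actual := min actual 200
      if actual ≠ record.2.1 then hacked ++ [record.1] else hacked) acc
    = acc ++ arr.filterMap (fun r => if actualScoreB r.2.2 ≠ r.2.1 then some r.1 else none) := by
  induction arr generalizing acc with
  | nil => simp
  | cons r t ih =>
    simp only [List.foldl_cons, List.filterMap_cons]
    have hr := per_record r.2.2
    simp only at hr
    simp only [hr]
    by_cases hc : actualScoreB r.2.2 ≠ r.2.1
    · rw [if_pos hc, if_pos hc, ih]
      simp
    · rw [if_neg hc, if_neg hc, ih]

-- ===== VERDICT (by name: the statement is the Claim_ definition above) =====
theorem find_hack_spec : Claim_equal_find_hack := by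
  intro arr _
  show find_hack arr = find_hack_alt arr
  unfold find_hack find_hack_alt
  simpa using foldl_filterMap arr []
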